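-- pv_equiv track=rewrite | github.com/jjweidon/exct | programmers/인사고과.py | solution
-- ===== SOURCE A (Python) =====
-- def solution(scores):
--     wanho = scores[0]
--     scores.sort(key=lambda x: (-x[0], -x[1]))
--     insentive = [scores[0]]
--     limit_x, limit_y = scores[0][0], scores[0][1]
--     temp_x, temp_y = limit_x, limit_y
--
--     for i in range(1, len(scores)):
--         x, y = scores[i][0], scores[i][1]
--         if x < temp_x:
--             limit_x = temp_x
--             limit_y = temp_y
--             temp_x = x
--             if y > limit_y:
--                 temp_y = y
--
--         if x < limit_x and y < limit_y:
--             continue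
--         insentive.append(scores[i])
--
--     insentive.sort(key=lambda x: -(x[0]+x[1]))
--
--     rank = 1
--     maxx = sum(insentive[0])
--     for i in range(len(insentive)):
--         if sum(insentive[i]) < maxx:
--             maxx = sum(insentive[i])
--             rank = i+1
--         if insentive[i] == wanho:
--             return rank
--     return -1
-- ===== SOURCE B (Python) =====
-- def solution(scores):
--     # Return-value equivalent to A; B does not sort/mutate `scores` (A sorts it in place).
--     w = scores[0]
--     if any(q[0] > w[0] and q[1] > w[1] for q in scores):
--         return -1
--     undom = [p for p in scores
--              if not any(q[0] > p[0] and q[1] > p[1] for q in scores)]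
--     order = sorted(undom, key=lambda p: (-(p[0] + p[1]), -p[0], -p[1]))
--     pre = [sum(p) for p in order[:order.index(w) + 1]]
--     return 1 + pre.index(min(pre))
-- ===== Notes on version B (the rewrite author's own statement) =====
-- stated objective: alternative
-- what changed: B drops A's descending pre-sort and stateful frontier scan in favour of a direct pairwise domination filter over the unsorted input, fuses A's two staged stable sorts into a single stable sort by the explicit 3-part key (-(p0+p1), -p0, -p1), and replaces A's stateful early-return ranking scan by the closed form 1 + first index of the minimal prefix sum; B does not mutate scores (A sorts it in place), so the equivalence is about the return value only.
import Mathlib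
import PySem

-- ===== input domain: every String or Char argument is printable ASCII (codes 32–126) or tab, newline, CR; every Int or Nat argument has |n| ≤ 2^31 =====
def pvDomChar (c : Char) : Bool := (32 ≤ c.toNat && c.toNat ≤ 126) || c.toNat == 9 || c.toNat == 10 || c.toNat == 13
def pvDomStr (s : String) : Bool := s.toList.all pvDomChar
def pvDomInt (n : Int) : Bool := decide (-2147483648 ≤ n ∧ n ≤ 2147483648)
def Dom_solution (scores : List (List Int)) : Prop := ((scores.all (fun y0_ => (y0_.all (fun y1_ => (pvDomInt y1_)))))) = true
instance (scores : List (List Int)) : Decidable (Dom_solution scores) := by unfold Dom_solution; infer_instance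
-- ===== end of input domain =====

-- B replaces A's descending pre-sort and frontier scan by a direct pairwise domination filter,
-- fuses A's two staged stable sorts into one stable sort by the 3-part key (-(p0+p1), -p0, -p1),
-- and replaces A's stateful ranking scan by 1 + first index of the minimal prefix sum.
-- Return-value equivalence only: A sorts `scores` in place, B does not mutate it.

-- ===== PORT A =====
-- x[0], x[1], sum(x): exact on the inner lists of length ≥ 2 admitted by Pre_solution
def fst2 (p : List Int) : Int := PySem.List.pyGetD p 0 0
def snd2 (p : List Int) : Int := PySem.List.pyGetD p 1 0
def pySum (p : List Int) : Int := p.foldl (· + ·) 0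

-- body of A's `for i in range(1, len(scores))` loop: state (limit_x, limit_y, temp_x, temp_y, insentive)
def aStep : (Int × Int × Int × Int × List (List Int)) → List Int → (Int × Int × Int × Int × List (List Int))
  | (lx, ly, tx, ty, ins), p =>
    let x := fst2 p
    let y := snd2 p
    let st := if x < tx then (tx, ty, x, if y > ty then y else ty) else (lx, ly, tx, ty)
    if x < st.1 ∧ y < st.2.1 then (st.1, st.2.1, st.2.2.1, st.2.2.2, ins)
    else (st.1, st.2.1, st.2.2.1, st.2.2.2, ins ++ [p])

-- A's rank loop with its early return (i, maxx, rank are the Python variables)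
def rankLoop (wanho : List Int) (l : List (List Int)) (i maxx rank : Int) : Int :=
  match l with
  | [] => -1
  | p :: t =>
    let mr : Int × Int := if pySum p < maxx then (pySum p, i + 1) else (maxx, rank)
    if p == wanho then mr.2 else rankLoop wanho t (i + 1) mr.1 mr.2

def solution (scores : List (List Int)) : Int :=
  match scores with
  | [] => 0   -- Python raises IndexError here (outside Pre_solution)
  | w :: _ =>
    let ss := PySem.List.sorted2 scores (fun x => -(fst2 x)) (fun x => -(snd2 x))
    match ss with
    | [] => 0   -- unreachable: ss is a permutation of a nonempty list
    | s0 :: rest =>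
      let st := rest.foldl aStep (fst2 s0, snd2 s0, fst2 s0, snd2 s0, [s0])
      let ins2 := PySem.List.sorted st.2.2.2.2 (fun x => -(fst2 x + snd2 x))
      match ins2 with
      | [] => 0   -- unreachable: insentive contains scores[0]
      | j0 :: tl => rankLoop w (j0 :: tl) 0 (pySum j0) 1

-- ===== PORT B =====
-- the 3-part tuple key (-(p[0]+p[1]), -p[0], -p[1]) compared lexicographically, as Python does
def lex3B (a c : List Int) : Bool :=
  decide (-(fst2 a + snd2 a) < -(fst2 c + snd2 c)) ||
  (!decide (-(fst2 c + snd2 c) < -(fst2 a + snd2 a)) &&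
    (decide (-(fst2 a) < -(fst2 c)) ||
      (!decide (-(fst2 c) < -(fst2 a)) && decide (-(snd2 a) < -(snd2 c)))))

-- Source B's `sorted(undom, key=...)`: hand port of Python's stable sort as the same stable
-- insertion-sort scheme PySem.List.sorted/sorted2 use (exact: each element is inserted after
-- all earlier elements whose key is not strictly greater)
def sort3 (xs : List (List Int)) : List (List Int) :=
  xs.foldl (fun acc x => PySem.List.insertBy lex3B x acc) []

-- Source B's `1 + pre.index(min(pre))`
def bRank (pre : List Int) : Int :=
  match PySem.List.min? pre (fun v => v) with
  | none => 0   -- unreachable: pre is nonempty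
  | some m =>
    match PySem.List.index? pre m with
    | none => 0   -- unreachable: min(pre) ∈ pre
    | some j => 1 + (j : Int)

def solution_alt (scores : List (List Int)) : Int :=
  match scores with
  | [] => 0   -- Python raises IndexError here (outside Pre_solution)
  | w :: _ =>
    if scores.any (fun q => decide (fst2 w < fst2 q) && decide (snd2 w < snd2 q)) then -1
    else
      let undom := scores.filter (fun p =>
        !(scores.any (fun q => decide (fst2 p < fst2 q) && decide (snd2 p < snd2 q))))
      let order := sort3 undom
      match PySem.List.index? order w with
      | none => 0   -- unreachable: w is undominated, so w ∈ order (Python's .index would raise)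
      | some i0 => bRank ((order.take (i0 + 1)).map pySum)

-- ===== PRECONDITION & SPEC =====
-- Pre_ excludes exactly the inputs where Python A raises IndexError: an empty scores list
-- (scores[0]) or an inner list with fewer than two entries (the sort key and x, y accesses).
def Pre_solution (scores : List (List Int)) : Prop :=
  scores ≠ [] ∧ ∀ p ∈ scores, 2 ≤ p.length
instance (scores : List (List Int)) : Decidable (Pre_solution scores) := by
  unfold Pre_solution; infer_instance

def pvWitness_solution : List (List Int) := [[4, 5], [2, 1], [4, 1], [2, 5], [1, 2]]

def Spec_solution (scores : List (List Int)) (out : Int) : Prop := out = solution_alt scores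
instance (scores : List (List Int)) (out : Int) : Decidable (Spec_solution scores out) := by
  unfold Spec_solution; infer_instance

-- ===== CLAIM (what is proved, stated in full; the proofs are below) =====
def Claim_equal_solution : Prop := ∀ (scores : List (List Int)), Dom_solution scores → Pre_solution scores → Spec_solution scores (solution scores)

-- ===== LEMMAS AND PROOFS =====

-- `q strictly beats p in both scores`, over a list
def domB (full : List (List Int)) (p : List Int) : Bool :=
  full.any (fun q => decide (fst2 p < fst2 q) && decide (snd2 p < snd2 q))

theorem domB_iff (full : List (List Int)) (p : List Int) :
    domB full p = true ↔ ∃ q ∈ full, fst2 p < fst2 q ∧ snd2 p < snd2 q := by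
  simp [domB]

-- the comparator sorted2 uses for key = (-x[0], -x[1])
def lexB (a c : List Int) : Bool :=
  decide (-(fst2 a) < -(fst2 c)) || (!decide (-(fst2 c) < -(fst2 a)) && decide (-(snd2 a) < -(snd2 c)))

theorem sorted2_eq_foldl (xs : List (List Int)) :
    PySem.List.sorted2 xs (fun x => -(fst2 x)) (fun x => -(snd2 x)) =
      xs.foldl (fun acc x => PySem.List.insertBy lexB x acc) [] := rfl

-- the comparator A's second sort uses for key = -(x[0]+x[1])
def sumB (a c : List Int) : Bool := decide (-(fst2 a + snd2 a) < -(fst2 c + snd2 c))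

theorem sorted_sum_eq_foldl (xs : List (List Int)) :
    PySem.List.sorted xs (fun x => -(fst2 x + snd2 x)) =
      xs.foldl (fun acc x => PySem.List.insertBy sumB x acc) [] :=
  PySem.List.sorted_eq_foldl_insertBy xs (fun x => -(fst2 x + snd2 x))

theorem insertBy_pairwise {α : Type} (b : α → α → Bool)
    (hasym : ∀ x y, b x y = true → b y x = false)
    (htr : ∀ x y z, b y x = false → b z y = false → b z x = false)
    (x : α) (acc : List α) (h : acc.Pairwise (fun u v => b v u = false)) :
    (PySem.List.insertBy b x acc).Pairwise (fun u v => b v u = false) := by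
  induction acc with
  | nil => simp [PySem.List.insertBy]
  | cons y ys ih =>
    rw [List.pairwise_cons] at h
    by_cases hb : b x y = true
    · rw [PySem.List.insertBy, if_pos hb]
      refine List.Pairwise.cons ?_ (List.Pairwise.cons h.1 h.2)
      intro z hz
      rcases List.mem_cons.mp hz with rfl | hz
      · exact hasym _ _ hb
      · exact htr _ y _ (hasym _ _ hb) (h.1 z hz)
    · rw [PySem.List.insertBy, if_neg hb]
      refine List.Pairwise.cons ?_ (ih h.2)
      intro z hz
      rcases (PySem.List.mem_insertBy _ _ _ _).mp hz with rfl | hz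
      · exact Bool.eq_false_iff.mpr hb
      · exact h.1 z hz

theorem foldl_insertBy_pairwise {α : Type} (b : α → α → Bool)
    (hasym : ∀ x y, b x y = true → b y x = false)
    (htr : ∀ x y z, b y x = false → b z y = false → b z x = false) :
    ∀ (xs acc : List α), acc.Pairwise (fun u v => b v u = false) →
      (xs.foldl (fun acc x => PySem.List.insertBy b x acc) acc).Pairwise (fun u v => b v u = false) := by
  intro xs
  induction xs with
  | nil => intro acc h; simpa using h
  | cons x t ih => intro acc h; exact ih _ (insertBy_pairwise b hasym htr x acc h)

-- the full lexicographic descending order sorted2 produces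
theorem ss_pairwise (xs : List (List Int)) :
    (PySem.List.sorted2 xs (fun x => -(fst2 x)) (fun x => -(snd2 x))).Pairwise
      (fun a c => fst2 c < fst2 a ∨ (fst2 c = fst2 a ∧ snd2 c ≤ snd2 a)) := by
  have h := foldl_insertBy_pairwise lexB
    (by intro x y hxy; simp [lexB] at *; omega)
    (by intro x y z h1 h2; simp [lexB] at *; omega)
    xs [] (List.Pairwise.nil)
  rw [sorted2_eq_foldl]
  refine h.imp ?_
  intro a c hac; simp [lexB] at hac; omega

-- A's frontier pass, re-expressed with an Option running max (proof vehicle only)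
def cmb (hi : Option Int) (gy : Int) : Int := match hi with | none => gy | some m => max m gy

def keepc (hi : Option Int) (y : Int) : Bool :=
  match hi with | none => true | some m => decide (m ≤ y)

def frontStep : (Option Int × Int × Int × List (List Int)) → List Int → (Option Int × Int × Int × List (List Int))
  | (hi, gx, gy, kept), p =>
    let st := if fst2 p < gx
      then ((some (cmb hi gy) : Option Int), fst2 p, snd2 p)
      else (hi, gx, gy)
    if keepc st.1 (snd2 p)
    then (st.1, st.2.1, st.2.2, kept ++ [p])
    else (st.1, st.2.1, st.2.2, kept)

-- A's filter loop and the frontStep pass keep exactly the same elements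
theorem filt : ∀ (l : List (List Int)) (lx ly tx ty gy : Int) (hi : Option Int) (acc : List (List Int)),
    l.Pairwise (fun a c => fst2 c ≤ fst2 a) →
    (∀ p ∈ l, fst2 p ≤ tx) →
    ty = cmb hi gy →
    (hi = none → lx = tx) →
    (∀ m, hi = some m → ly = m ∧ tx < lx) →
    (l.foldl aStep (lx, ly, tx, ty, acc)).2.2.2.2 = (l.foldl frontStep (hi, tx, gy, acc)).2.2.2 := by
  intro l
  induction l with
  | nil => intro lx ly tx ty gy hi acc _ _ _ _ _; rfl
  | cons p t ih =>
    intro lx ly tx ty gy hi acc hpw hhd hty hnone hsome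
    rw [List.pairwise_cons] at hpw
    have hx : fst2 p ≤ tx := hhd p List.mem_cons_self
    simp only [List.foldl_cons]
    by_cases hlt : fst2 p < tx
    · have ha : aStep (lx, ly, tx, ty, acc) p =
          (tx, ty, fst2 p, (if snd2 p > ty then snd2 p else ty),
            if snd2 p < ty then acc else acc ++ [p]) := by
        simp [aStep, hlt]
        split_ifs <;> rfl
      have hb : frontStep (hi, tx, gy, acc) p =
          ((some ty : Option Int), fst2 p, snd2 p,
            if ty ≤ snd2 p then acc ++ [p] else acc) := by
        cases hi with
        | none =>
          have hgy : ty = gy := by simpa [cmb] using hty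
          subst hgy
          simp [frontStep, keepc, cmb, hlt]
          split_ifs <;> rfl
        | some m =>
          have hgy : ty = max m gy := by simpa [cmb] using hty
          subst hgy
          simp [frontStep, keepc, cmb, hlt]
          split_ifs <;> rfl
      rw [ha, hb]
      have hacc : (if snd2 p < ty then acc else acc ++ [p]) =
          (if ty ≤ snd2 p then acc ++ [p] else acc) := by
        split_ifs <;> first | rfl | omega
      rw [hacc]
      exact ih tx ty (fst2 p) _ (snd2 p) (some ty) _ hpw.2
        (fun q hq => hpw.1 q hq)
        (by show (if snd2 p > ty then snd2 p else ty) = max ty (snd2 p); split_ifs <;> omega)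
        (by intro h; cases h)
        (by intro m hm; cases hm; exact ⟨rfl, hlt⟩)
    · have hxeq : fst2 p = tx := by omega
      have ha : aStep (lx, ly, tx, ty, acc) p =
          (lx, ly, tx, ty, if fst2 p < lx ∧ snd2 p < ly then acc else acc ++ [p]) := by
        simp [aStep, hlt]
        split_ifs <;> rfl
      cases hi with
      | none =>
        have hlx : lx = tx := hnone rfl
        have hb : frontStep ((none : Option Int), tx, gy, acc) p =
            ((none : Option Int), tx, gy, acc ++ [p]) := by
          simp only [frontStep, if_neg hlt]; rfl
        have hcond : ¬(fst2 p < lx ∧ snd2 p < ly) := by omega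
        rw [ha, hb, if_neg hcond]
        exact ih lx ly tx ty gy none _ hpw.2
          (fun q hq => le_of_le_of_eq (hpw.1 q hq) hxeq) hty hnone hsome
      | some m =>
        obtain ⟨hly, hlxgt⟩ := hsome m rfl
        have hb : frontStep ((some m : Option Int), tx, gy, acc) p =
            ((some m : Option Int), tx, gy,
              if m ≤ snd2 p then acc ++ [p] else acc) := by
          simp only [frontStep, keepc, if_neg hlt]
          by_cases hm : m ≤ snd2 p <;> simp [hm]
        have hcond : (if fst2 p < lx ∧ snd2 p < ly then acc else acc ++ [p]) =
            (if m ≤ snd2 p then acc ++ [p] else acc) := by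
          split_ifs <;> first | rfl | omega
        rw [ha, hb, hcond]
        exact ih lx ly tx ty gy (some m) _ hpw.2
          (fun q hq => le_of_le_of_eq (hpw.1 q hq) hxeq) hty hnone hsome

-- the frontier pass keeps exactly the rows no row of `full` strictly beats
theorem front_filter (full : List (List Int)) :
    ∀ (l : List (List Int)) (hi : Option Int) (gx gy : Int) (acc : List (List Int)),
    l.Pairwise (fun a c => fst2 c < fst2 a ∨ (fst2 c = fst2 a ∧ snd2 c ≤ snd2 a)) →
    (∀ p ∈ l, fst2 p ≤ gx ∧ (fst2 p = gx → snd2 p ≤ gy)) →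
    (∀ q ∈ l, q ∈ full) →
    (∀ q ∈ full, gx ≤ fst2 q ∨ q ∈ l) →
    (∀ y : Int, (∃ q ∈ full, gx < fst2 q ∧ y < snd2 q) ↔ (∃ m, hi = some m ∧ y < m)) →
    (∀ y : Int, (∃ q ∈ full, gx ≤ fst2 q ∧ y < snd2 q) ↔ y < cmb hi gy) →
    (l.foldl frontStep (hi, gx, gy, acc)).2.2.2 = acc ++ l.filter (fun p => !domB full p) := by
  intro l
  induction l with
  | nil => intro hi gx gy acc _ _ _ _ _ _; simp
  | cons p t ih =>
    intro hi gx gy acc h1 h2 h3 h4 h5 h6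
    rw [List.pairwise_cons] at h1
    have hple : fst2 p ≤ gx := (h2 p List.mem_cons_self).1
    by_cases hlt : fst2 p < gx
    · -- p starts a new, strictly lower group
      have K1 : ∀ y : Int, (∃ q ∈ full, fst2 p < fst2 q ∧ y < snd2 q) ↔ y < cmb hi gy := by
        intro y
        constructor
        · rintro ⟨q, hqf, hq1, hq2⟩
          rcases h4 q hqf with hge | hmem
          · exact (h6 y).mp ⟨q, hqf, hge, hq2⟩
          · rcases List.mem_cons.mp hmem with rfl | hmt
            · omega
            · have := h1.1 q hmt; omega
        · intro hy
          obtain ⟨q, hqf, hq1, hq2⟩ := (h6 y).mpr hy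
          exact ⟨q, hqf, by omega, hq2⟩
      have hkeep : (decide (cmb hi gy ≤ snd2 p)) = !domB full p := by
        rcases Bool.eq_false_or_eq_true (domB full p) with hd | hd
        · rw [hd]
          obtain ⟨q, hqf, hq1, hq2⟩ := (domB_iff full p).mp hd
          have : snd2 p < cmb hi gy := (K1 (snd2 p)).mp ⟨q, hqf, hq1, hq2⟩
          simp; omega
        · rw [hd]
          have : ¬ (snd2 p < cmb hi gy) := by
            intro hc
            obtain ⟨q, hqf, hq1, hq2⟩ := (K1 (snd2 p)).mpr hc
            exact absurd ((domB_iff full p).mpr ⟨q, hqf, hq1, hq2⟩) (by simp [hd])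
          simp; omega
      have hstep : frontStep (hi, gx, gy, acc) p =
          ((some (cmb hi gy) : Option Int), fst2 p, snd2 p,
            if domB full p then acc else acc ++ [p]) := by
        simp only [frontStep, if_pos hlt]
        have hk : keepc (some (cmb hi gy)) (snd2 p) = !domB full p := by
          simp only [keepc]; exact hkeep
        rw [hk]
        cases hdb : domB full p <;> simp
      rw [List.foldl_cons, hstep]
      have ht2 : ∀ q ∈ t, fst2 q ≤ fst2 p ∧ (fst2 q = fst2 p → snd2 q ≤ snd2 p) := by
        intro q hq; have := h1.1 q hq; omega
      have ht4 : ∀ q ∈ full, fst2 p ≤ fst2 q ∨ q ∈ t := by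
        intro q hqf
        rcases h4 q hqf with hge | hmem
        · left; omega
        · rcases List.mem_cons.mp hmem with rfl | hmt
          · left; omega
          · right; exact hmt
      have ht5 : ∀ y : Int, (∃ q ∈ full, fst2 p < fst2 q ∧ y < snd2 q) ↔
          (∃ m, (some (cmb hi gy) : Option Int) = some m ∧ y < m) := by
        intro y
        rw [K1 y]
        constructor
        · intro hy; exact ⟨cmb hi gy, rfl, hy⟩
        · rintro ⟨m, hm, hy⟩; cases hm; exact hy
      have ht6 : ∀ y : Int, (∃ q ∈ full, fst2 p ≤ fst2 q ∧ y < snd2 q) ↔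
          y < cmb (some (cmb hi gy)) (snd2 p) := by
        intro y
        have hcmb : cmb (some (cmb hi gy)) (snd2 p) = max (cmb hi gy) (snd2 p) := rfl
        rw [hcmb]
        constructor
        · rintro ⟨q, hqf, hq1, hq2⟩
          by_cases hgt : fst2 p < fst2 q
          · have := (K1 y).mp ⟨q, hqf, hgt, hq2⟩; omega
          · have hqe : fst2 q = fst2 p := by omega
            rcases h4 q hqf with hge | hmem
            · omega
            · rcases List.mem_cons.mp hmem with rfl | hmt
              · omega
              · have := (ht2 q hmt).2 hqe; omega
        · intro hy
          rcases lt_max_iff.mp hy with hy1 | hy2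
          · obtain ⟨q, hqf, hq1, hq2⟩ := (K1 y).mpr hy1
            exact ⟨q, hqf, by omega, hq2⟩
          · exact ⟨p, h3 p List.mem_cons_self, le_refl _, hy2⟩
      rw [ih (some (cmb hi gy)) (fst2 p) (snd2 p) _ h1.2 ht2
        (fun q hq => h3 q (List.mem_cons_of_mem p hq)) ht4 ht5 ht6]
      rw [List.filter_cons]
      rcases Bool.eq_false_or_eq_true (domB full p) with hd | hd <;> simp [hd]
    · -- p stays in the current group: fst2 p = gx
      have hxeq : fst2 p = gx := by omega
      have hkeep : keepc hi (snd2 p) = !domB full p := by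
        have hdom : domB full p = true ↔ ∃ m, hi = some m ∧ snd2 p < m := by
          rw [domB_iff]
          rw [← h5 (snd2 p)]
          constructor
          · rintro ⟨q, hqf, hq1, hq2⟩; exact ⟨q, hqf, by omega, hq2⟩
          · rintro ⟨q, hqf, hq1, hq2⟩; exact ⟨q, hqf, by omega, hq2⟩
        cases hi with
        | none =>
          have : domB full p = false := by
            rcases Bool.eq_false_or_eq_true (domB full p) with hd | hd
            · obtain ⟨m, hm, _⟩ := hdom.mp hd; cases hm
            · exact hd
          simp [keepc, this]
        | some m =>
          rcases Bool.eq_false_or_eq_true (domB full p) with hd | hd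
          · obtain ⟨m', hm', hc⟩ := hdom.mp hd
            cases hm'
            simp [keepc, hd]; omega
          · have : ¬ snd2 p < m := by
              intro hc
              exact absurd (hdom.mpr ⟨m, rfl, hc⟩) (by simp [hd])
            simp [keepc, hd]; omega
      have hstep : frontStep (hi, gx, gy, acc) p =
          (hi, gx, gy, if domB full p then acc else acc ++ [p]) := by
        simp only [frontStep, if_neg hlt]
        rw [hkeep]
        cases hdb : domB full p <;> simp
      rw [List.foldl_cons, hstep]
      have ht4 : ∀ q ∈ full, gx ≤ fst2 q ∨ q ∈ t := by
        intro q hqf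
        rcases h4 q hqf with hge | hmem
        · left; exact hge
        · rcases List.mem_cons.mp hmem with rfl | hmt
          · left; omega
          · right; exact hmt
      rw [ih hi gx gy _ h1.2 (fun q hq => h2 q (List.mem_cons_of_mem p hq))
        (fun q hq => h3 q (List.mem_cons_of_mem p hq)) ht4 h5 h6]
      rw [List.filter_cons]
      rcases Bool.eq_false_or_eq_true (domB full p) with hd | hd <;> simp [hd]

-- ============== stable-sort fusion machinery ==============

-- inserting a decorated element among elements it is not `R`-before walks exactly like
-- inserting its projection
theorem ins_dec {α β : Type} (b : α → α → Bool) (R : β → β → Bool) (pr : β → α) (x : β) :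
    ∀ (acc : List β), (∀ y ∈ acc, R x y = false) →
    (PySem.List.insertBy (fun u v => b (pr u) (pr v) || (!b (pr v) (pr u) && R u v)) x acc).map pr
      = PySem.List.insertBy b (pr x) (acc.map pr) := by
  intro acc
  induction acc with
  | nil => intro _; simp [PySem.List.insertBy]
  | cons y ys ih =>
    intro hR
    have hxy : R x y = false := hR y List.mem_cons_self
    by_cases hb : b (pr x) (pr y) = true
    · rw [PySem.List.insertBy, if_pos (by simp [hb]), List.map_cons, List.map_cons,
        PySem.List.insertBy, if_pos hb]
    · rw [PySem.List.insertBy, if_neg (by simp [hb, hxy]), List.map_cons, List.map_cons,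
        PySem.List.insertBy, if_neg hb, ih (fun z hz => hR z (List.mem_cons_of_mem y hz))]

-- sorting decorated elements with the `R`-refined comparator projects to sorting the projections
theorem sort_dec {α β : Type} (b : α → α → Bool) (R : β → β → Bool) (pr : β → α)
    (hasym : ∀ u v, R u v = true → R v u = false) :
    ∀ (M acc : List β), M.Pairwise (fun u v => R u v = true) →
      (∀ x ∈ M, ∀ y ∈ acc, R x y = false) →
      (M.foldl (fun a x =>
          PySem.List.insertBy (fun u v => b (pr u) (pr v) || (!b (pr v) (pr u) && R u v)) x a) acc).map pr
        = (M.map pr).foldl (fun a x => PySem.List.insertBy b x a) (acc.map pr) := by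
  intro M
  induction M with
  | nil => intro acc _ _; rfl
  | cons x t ih =>
    intro acc hpw hacc
    rw [List.pairwise_cons] at hpw
    rw [List.foldl_cons, List.map_cons, List.foldl_cons,
      ← ins_dec b R pr x acc (hacc x List.mem_cons_self)]
    refine ih _ hpw.2 ?_
    intro x' hx' y hy
    rcases (PySem.List.mem_insertBy _ _ _ _).mp hy with rfl | hy
    · exact hasym _ _ (hpw.1 x' hx')
    · exact hacc x' (List.mem_cons_of_mem x hx') y hy

-- zipIdx basics
theorem zipIdx_ge {α : Type} : ∀ (xs : List α) (n : Nat), ∀ v ∈ xs.zipIdx n, n ≤ v.2 := by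
  intro xs
  induction xs with
  | nil => intro n v hv; simp [List.zipIdx] at hv
  | cons x t ih =>
    intro n v hv
    rcases List.mem_cons.mp hv with rfl | hv
    · exact le_refl _
    · exact Nat.le_of_succ_le (ih (n + 1) v hv)

theorem zipIdx_pairwise_lt {α : Type} : ∀ (xs : List α) (n : Nat),
    (xs.zipIdx n).Pairwise (fun u v => decide (u.2 < v.2) = true) := by
  intro xs
  induction xs with
  | nil => intro n; simp [List.zipIdx]
  | cons x t ih =>
    intro n
    refine List.Pairwise.cons ?_ (ih (n + 1))
    intro v hv
    have := zipIdx_ge t (n + 1) v hv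
    simp; omega

theorem zipIdx_map_fst {α : Type} : ∀ (xs : List α) (n : Nat), (xs.zipIdx n).map Prod.fst = xs := by
  intro xs
  induction xs with
  | nil => intro n; rfl
  | cons x t ih => intro n; simp only [List.zipIdx, List.map_cons, ih]

theorem zipIdx_snd_nodup {α : Type} : ∀ (xs : List α) (n : Nat), ((xs.zipIdx n).map Prod.snd).Nodup := by
  intro xs
  induction xs with
  | nil => intro n; simp
  | cons x t ih =>
    intro n
    refine List.Nodup.cons ?_ (ih (n + 1))
    intro hmem
    obtain ⟨v, hv, hv2⟩ := List.mem_map.mp hmem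
    have := zipIdx_ge t (n + 1) v hv
    omega

-- insertion sort permutes its input
theorem insertBy_perm {α : Type} (b : α → α → Bool) (x : α) :
    ∀ (l : List α), (PySem.List.insertBy b x l).Perm (x :: l) := by
  intro l
  induction l with
  | nil => simp [PySem.List.insertBy]
  | cons y ys ih =>
    rw [PySem.List.insertBy]
    by_cases hb : b x y = true
    · rw [if_pos hb]
    · rw [if_neg hb]
      exact (ih.cons y).trans (List.Perm.swap x y ys)

theorem foldl_insertBy_perm {α : Type} (b : α → α → Bool) :
    ∀ (M acc : List α), (M.foldl (fun a x => PySem.List.insertBy b x a) acc).Perm (acc ++ M) := by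
  intro M
  induction M with
  | nil => intro acc; simp
  | cons x t ih =>
    intro acc
    rw [List.foldl_cons]
    refine (ih _).trans ?_
    refine (List.Perm.append_right t (insertBy_perm b x acc)).trans ?_
    exact List.perm_middle.symm

-- a permutation sorted twice by the same total strict comparator is sorted uniquely
theorem sorted_unique {β : Type} (C : β → β → Bool) :
    ∀ (l1 l2 : List β), l1.Perm l2 →
      l1.Pairwise (fun u v => C v u = false) → l2.Pairwise (fun u v => C v u = false) →
      (∀ u ∈ l1, ∀ v ∈ l1, C u v = false → C v u = false → u = v) →
      l1 = l2 := by
  intro l1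
  induction l1 with
  | nil => intro l2 hp _ _ _; exact hp.nil_eq
  | cons h1 t1 ih =>
    intro l2 hp hp1 hp2 htot
    obtain ⟨h2, t2, rfl⟩ : ∃ h2 t2, l2 = h2 :: t2 := by
      cases l2 with
      | nil => exact absurd hp.eq_nil (by simp)
      | cons a b => exact ⟨a, b, rfl⟩
    rw [List.pairwise_cons] at hp1 hp2
    by_cases he : h1 = h2
    · subst he
      rw [ih t2 (hp.cons_inv) hp1.2 hp2.2
        (fun u hu v hv => htot u (List.mem_cons_of_mem _ hu) v (List.mem_cons_of_mem _ hv))]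
    · exfalso
      have h1mem : h1 ∈ h2 :: t2 := hp.mem_iff.mp List.mem_cons_self
      have h1t2 : h1 ∈ t2 := by
        rcases List.mem_cons.mp h1mem with h | h
        · exact absurd h he
        · exact h
      have h2mem : h2 ∈ h1 :: t1 := hp.mem_iff.mpr List.mem_cons_self
      have h2t1 : h2 ∈ t1 := by
        rcases List.mem_cons.mp h2mem with h | h
        · exact absurd h.symm he
        · exact h
      have hc1 : C h1 h2 = false := hp2.1 h1 h1t2
      have hc2 : C h2 h1 = false := hp1.1 h2 h2t1
      exact he (htot h1 List.mem_cons_self h2 (List.mem_cons_of_mem _ h2t1) hc1 hc2)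

-- filter of a map projects back
theorem filter_map_fst {α β : Type} (g : α → Bool) :
    ∀ (l : List (α × β)), (l.map Prod.fst).filter g = (l.filter (fun u => g u.1)).map Prod.fst := by
  intro l
  induction l with
  | nil => rfl
  | cons x t ih =>
    rw [List.map_cons, List.filter_cons, List.filter_cons]
    cases hg : g x.1 <;> simp [ih]

-- the decorated comparators
def decIdx (u v : List Int × Nat) : Bool := decide (u.2 < v.2)
def C1 (u v : List Int × Nat) : Bool := lexB u.1 v.1 || (!lexB v.1 u.1 && decIdx u v)
def C2 (u v : List Int × Nat) : Bool := sumB u.1 v.1 || (!sumB v.1 u.1 && C1 u v)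
def C3 (u v : List Int × Nat) : Bool := lex3B u.1 v.1 || (!lex3B v.1 u.1 && decIdx u v)

theorem C2_eq_C3 : C2 = C3 := by
  funext u v
  simp only [C2, C3, C1, decIdx, sumB, lexB, lex3B]
  by_cases h1 : (-(fst2 u.1 + snd2 u.1) < -(fst2 v.1 + snd2 v.1)) <;>
  by_cases h2 : (-(fst2 v.1 + snd2 v.1) < -(fst2 u.1 + snd2 u.1)) <;>
  by_cases h3 : (-(fst2 u.1) < -(fst2 v.1)) <;>
  by_cases h4 : (-(fst2 v.1) < -(fst2 u.1)) <;>
  by_cases h5 : (-(snd2 u.1) < -(snd2 v.1)) <;>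
  by_cases h7 : (-(snd2 v.1) < -(snd2 u.1)) <;>
  by_cases h6 : (u.2 < v.2) <;>
  simp [h3, h4, h5, h6, h7] <;> omega

theorem C1_asym : ∀ u v, C1 u v = true → C1 v u = false := by
  intro u v h; simp [C1, decIdx, lexB] at *; omega

theorem C1_trans : ∀ u v w, C1 v u = false → C1 w v = false → C1 w u = false := by
  intro u v w h1 h2; simp [C1, decIdx, lexB] at *; omega

theorem C3_asym : ∀ u v, C3 u v = true → C3 v u = false := by
  intro u v h; simp [C3, decIdx, lex3B] at *; omega

theorem C3_trans : ∀ u v w, C3 v u = false → C3 w v = false → C3 w u = false := by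
  intro u v w h1 h2; simp [C3, decIdx, lex3B] at *; omega

theorem C3_total (u v : List Int × Nat) (h1 : C3 u v = false) (h2 : C3 v u = false) :
    u.2 = v.2 := by
  simp [C3, decIdx, lex3B] at *; omega

theorem decIdx_asym : ∀ u v : List Int × Nat, decIdx u v = true → decIdx v u = false := by
  intro u v h; simp [decIdx] at *; omega

-- A's two staged stable sorts equal one stable sort by the fused 3-part key
theorem two_sorts (xs : List (List Int)) (f : List Int → Bool) :
    PySem.List.sorted ((PySem.List.sorted2 xs (fun x => -(fst2 x)) (fun x => -(snd2 x))).filter f)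
      (fun x => -(fst2 x + snd2 x)) = sort3 (xs.filter f) := by
  have hD := zipIdx_pairwise_lt xs 0
  -- stage 1: the lexicographic sort, decorated
  have h0 := sort_dec lexB decIdx Prod.fst decIdx_asym (xs.zipIdx 0) [] hD (by simp)
  rw [zipIdx_map_fst xs 0] at h0
  have h1 : PySem.List.sorted2 xs (fun x => -(fst2 x)) (fun x => -(snd2 x)) =
      ((xs.zipIdx 0).foldl (fun a x => PySem.List.insertBy C1 x a) []).map Prod.fst := by
    rw [sorted2_eq_foldl]
    exact h0.symm
  set L1 := (xs.zipIdx 0).foldl (fun a x => PySem.List.insertBy C1 x a) [] with hL1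
  have hL1perm : L1.Perm (xs.zipIdx 0) := by
    simpa using foldl_insertBy_perm C1 (xs.zipIdx 0) []
  have hL1pw : L1.Pairwise (fun u v => C1 v u = false) :=
    foldl_insertBy_pairwise C1 C1_asym C1_trans (xs.zipIdx 0) [] List.Pairwise.nil
  -- indices in L1 are pairwise distinct
  have hL1nd : (L1.map Prod.snd).Nodup :=
    ((hL1perm.map Prod.snd).nodup_iff).mpr (zipIdx_snd_nodup xs 0)
  have hL1ne : L1.Pairwise (fun u v => u.2 ≠ v.2) := List.pairwise_map.mp hL1nd
  have hL1up : L1.Pairwise (fun u v => C1 u v = true) := by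
    refine (hL1pw.and hL1ne).imp ?_
    intro u v ⟨hc, hne⟩
    simp [C1, decIdx, lexB] at *; omega
  -- stage 2 on the filtered decorated list
  have hfpw : (L1.filter (fun u => f u.1)).Pairwise (fun u v => C1 u v = true) :=
    hL1up.sublist List.filter_sublist
  have h2 : (PySem.List.sorted2 xs (fun x => -(fst2 x)) (fun x => -(snd2 x))).filter f =
      (L1.filter (fun u => f u.1)).map Prod.fst := by
    rw [h1, filter_map_fst]
  have h3 : PySem.List.sorted ((PySem.List.sorted2 xs (fun x => -(fst2 x)) (fun x => -(snd2 x))).filter f)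
      (fun x => -(fst2 x + snd2 x)) =
      ((L1.filter (fun u => f u.1)).foldl (fun a x => PySem.List.insertBy C2 x a) []).map Prod.fst := by
    rw [sorted_sum_eq_foldl, h2]
    exact (sort_dec sumB C1 Prod.fst C1_asym (L1.filter (fun u => f u.1)) [] hfpw (by simp)).symm
  -- B's single sort, decorated
  have hDfpw : ((xs.zipIdx 0).filter (fun u => f u.1)).Pairwise (fun u v => decIdx u v = true) :=
    hD.sublist List.filter_sublist
  have h4 : sort3 (xs.filter f) =
      (((xs.zipIdx 0).filter (fun u => f u.1)).foldl (fun a x => PySem.List.insertBy C3 x a) []).map Prod.fst := by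
    have h40 := sort_dec lex3B decIdx Prod.fst decIdx_asym ((xs.zipIdx 0).filter (fun u => f u.1)) [] hDfpw (by simp)
    rw [← filter_map_fst f (xs.zipIdx 0), zipIdx_map_fst xs 0] at h40
    exact h40.symm
  -- the two decorated sorted lists coincide: same comparator, same multiset, both sorted,
  -- and the comparator is total on the distinct decorations
  have hpermf : (L1.filter (fun u => f u.1)).Perm ((xs.zipIdx 0).filter (fun u => f u.1)) :=
    hL1perm.filter _
  have hs1 := foldl_insertBy_pairwise C3 C3_asym C3_trans (L1.filter (fun u => f u.1)) [] List.Pairwise.nil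
  have hs2 := foldl_insertBy_pairwise C3 C3_asym C3_trans ((xs.zipIdx 0).filter (fun u => f u.1)) [] List.Pairwise.nil
  have hp1 : ((L1.filter (fun u => f u.1)).foldl (fun a x => PySem.List.insertBy C3 x a) []).Perm
      (L1.filter (fun u => f u.1)) := by
    simpa using foldl_insertBy_perm C3 (L1.filter (fun u => f u.1)) []
  have hp2 : (((xs.zipIdx 0).filter (fun u => f u.1)).foldl (fun a x => PySem.List.insertBy C3 x a) []).Perm
      ((xs.zipIdx 0).filter (fun u => f u.1)) := by
    simpa using foldl_insertBy_perm C3 ((xs.zipIdx 0).filter (fun u => f u.1)) []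
  have hnodup : ((((L1.filter (fun u => f u.1)).foldl
      (fun a x => PySem.List.insertBy C3 x a) [])).map Prod.snd).Nodup := by
    refine ((hp1.map Prod.snd).nodup_iff).mpr ?_
    refine (((hL1perm.filter _).map Prod.snd).nodup_iff).mpr ?_
    exact (zipIdx_snd_nodup xs 0).sublist (List.filter_sublist.map Prod.snd)
  have heq : ((L1.filter (fun u => f u.1)).foldl (fun a x => PySem.List.insertBy C3 x a) []) =
      (((xs.zipIdx 0).filter (fun u => f u.1)).foldl (fun a x => PySem.List.insertBy C3 x a) []) := by
    refine sorted_unique C3 _ _ (hp1.trans (hpermf.trans hp2.symm)) hs1 hs2 ?_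
    intro u hu v hv hc1 hc2
    have hsnd : u.2 = v.2 := C3_total u v hc1 hc2
    exact List.inj_on_of_nodup_map hnodup hu hv hsnd
  rw [h3, C2_eq_C3, heq, ← h4]

-- ============== B's closed-form rank = A's ranking scan ==============

-- min(pre) as a running minimum
def minI (s : List Int) : Int :=
  match s with
  | [] => 0
  | a :: t => t.foldl min a

theorem minI_le (s : List Int) : ∀ x ∈ s, minI s ≤ x := by
  match s with
  | [] => intro x hx; simp at hx
  | a :: t =>
    intro x hx
    rcases List.mem_cons.mp hx with rfl | hx
    · exact (PySem.List.foldl_min_le t x).1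
    · exact (PySem.List.foldl_min_le t a).2 x hx

theorem minI_mem (s : List Int) (h : s ≠ []) : minI s ∈ s := by
  match s with
  | a :: t =>
    show t.foldl min a ∈ a :: t
    rcases PySem.List.foldl_min_mem t a with h1 | h1
    · rw [h1]; exact List.mem_cons_self
    · exact List.mem_cons_of_mem a h1

theorem minI_append_singleton (s : List Int) (v : Int) (h : s ≠ []) :
    minI (s ++ [v]) = min (minI s) v := by
  match s with
  | a :: t => simp [minI, List.foldl_append]

theorem bRank_char (s : List Int) (h : s ≠ []) :
    PySem.List.min? s (fun v => v) = some (minI s) := by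
  match s with
  | a :: t => exact PySem.List.min?_id_cons a t

theorem bRank_single (v : Int) : bRank [v] = 1 ∧ minI [v] = v := by
  constructor
  · simp [bRank, PySem.List.min?_id_cons, List.foldl]
  · rfl

theorem snoc_lt (s : List Int) (v : Int) (h : s ≠ []) (hv : v < minI s) :
    minI (s ++ [v]) = v ∧ bRank (s ++ [v]) = (s.length : Int) + 1 := by
  have hmin : minI (s ++ [v]) = v := by
    rw [minI_append_singleton s v h]; omega
  have hnm : v ∉ s := fun hmem => absurd (minI_le s v hmem) (by omega)
  refine ⟨hmin, ?_⟩
  simp only [bRank, bRank_char (s ++ [v]) (by simp), hmin,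
    PySem.List.index?_append_singleton_self s v hnm]
  ring

theorem snoc_ge (s : List Int) (v : Int) (h : s ≠ []) (hv : minI s ≤ v) :
    minI (s ++ [v]) = minI s ∧ bRank (s ++ [v]) = bRank s := by
  have hmin : minI (s ++ [v]) = minI s := by
    rw [minI_append_singleton s v h]; omega
  refine ⟨hmin, ?_⟩
  simp only [bRank, bRank_char (s ++ [v]) (by simp), bRank_char s h, hmin,
    PySem.List.index?_append_of_mem [v] (minI_mem s h)]

-- A's ranking scan computes B's closed form
theorem rank_go (wanho : List Int) : ∀ (l done : List (List Int)), done ≠ [] →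
    rankLoop wanho l (done.length : Int) (minI (done.map pySum)) (bRank (done.map pySum)) =
      (match PySem.List.index? l wanho with
       | none => -1
       | some j => bRank (((done ++ l.take (j + 1)).map pySum))) := by
  intro l
  induction l with
  | nil => intro done hd; simp [rankLoop, PySem.List.index?, List.idxOf?]
  | cons p t ih =>
    intro done hd
    have hdm : done.map pySum ≠ [] := by simpa using hd
    have hstep : (if pySum p < minI (done.map pySum)
          then (pySum p, (done.length : Int) + 1)
          else (minI (done.map pySum), bRank (done.map pySum)))
        = (minI ((done ++ [p]).map pySum), bRank ((done ++ [p]).map pySum)) := by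
      rw [List.map_append]
      have hmap : (List.map pySum [p]) = [pySum p] := rfl
      rw [hmap]
      split_ifs with hc
      · obtain ⟨h1, h2⟩ := snoc_lt (done.map pySum) (pySum p) hdm hc
        rw [h1, h2, List.length_map]
      · obtain ⟨h1, h2⟩ := snoc_ge (done.map pySum) (pySum p) hdm (by omega)
        rw [h1, h2]
    rw [rankLoop, hstep]
    by_cases hw : p == wanho
    · have hpw : p = wanho := eq_of_beq hw
      rw [if_pos hw]
      subst hpw
      rw [PySem.List.index?_cons_self]
      simp
    · have hne : p ≠ wanho := by
        intro hpe; subst hpe; simp at hw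
      rw [if_neg (by simpa using hw)]
      have hlen : ((done ++ [p]).length : Int) = (done.length : Int) + 1 := by
        simp
      rw [← hlen]
      rw [ih (done ++ [p]) (by simp)]
      rw [PySem.List.index?_cons_of_ne t hne]
      cases hidx : PySem.List.index? t wanho with
      | none => simp
      | some j =>
        simp only [Option.map_some]
        rw [List.take_succ_cons, List.append_assoc]
        rfl

-- ===== VERDICT (by name: the statement is the Claim_ definition above) =====
theorem any_perm {α : Type} (f : α → Bool) {l1 l2 : List α} (h : l1.Perm l2) :
    l1.any f = l2.any f := by
  cases h1 : l1.any f <;> cases h2 : l2.any f <;> simp_all [List.any_eq_true]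
  · obtain ⟨x, hx, hf⟩ := h2
    exact absurd hf (by simpa using h1 x (h.mem_iff.mpr hx))
  · obtain ⟨x, hx, hf⟩ := h1
    exact absurd hf (by simpa using h2 x (h.mem_iff.mp hx))

theorem rankLoop_not_mem (wanho : List Int) : ∀ (l : List (List Int)) (i maxx rank : Int),
    wanho ∉ l → rankLoop wanho l i maxx rank = -1 := by
  intro l
  induction l with
  | nil => intro i maxx rank _; rfl
  | cons p t ih =>
    intro i maxx rank h
    rw [rankLoop]
    rw [if_neg (by simp; intro he; exact absurd (he ▸ List.mem_cons_self) h)]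
    exact ih _ _ _ (fun hm => h (List.mem_cons_of_mem p hm))

theorem index?_some_of_mem {α : Type} [BEq α] [LawfulBEq α] :
    ∀ (l : List α) (v : α), v ∈ l → ∃ j, PySem.List.index? l v = some j := by
  intro l
  induction l with
  | nil => intro v hv; exact absurd hv List.not_mem_nil
  | cons x t ih =>
    intro v hv
    by_cases hx : x = v
    · subst hx
      exact ⟨0, PySem.List.index?_cons_self _ _⟩
    · rw [PySem.List.index?_cons_of_ne t hx]
      rcases List.mem_cons.mp hv with rfl | hvt
      · exact absurd rfl hx
      · obtain ⟨j, hj⟩ := ih v hvt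
        exact ⟨j + 1, by rw [hj]; rfl⟩

theorem solution_spec : Claim_equal_solution := by
  intro scores hdom hpre
  unfold Spec_solution
  obtain ⟨hne, hlen⟩ := hpre
  obtain ⟨w, t0, rfl⟩ : ∃ w t0, scores = w :: t0 := by
    cases scores with
    | nil => exact absurd rfl hne
    | cons a b => exact ⟨a, b, rfl⟩
  have hperm : (PySem.List.sorted2 (w :: t0) (fun x => -(fst2 x)) (fun x => -(snd2 x))).Perm (w :: t0) :=
    PySem.List.sorted2_perm (w :: t0) (fun x => -(fst2 x)) (fun x => -(snd2 x)) false
  have hssne : PySem.List.sorted2 (w :: t0) (fun x => -(fst2 x)) (fun x => -(snd2 x)) ≠ [] := by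
    intro h
    rw [h] at hperm
    have := hperm.length_eq
    simp at this
  obtain ⟨s0, rest, hss⟩ :
      ∃ s0 rest, PySem.List.sorted2 (w :: t0) (fun x => -(fst2 x)) (fun x => -(snd2 x)) = s0 :: rest := by
    cases hc : PySem.List.sorted2 (w :: t0) (fun x => -(fst2 x)) (fun x => -(snd2 x)) with
    | nil => exact absurd hc hssne
    | cons a b => exact ⟨a, b, rfl⟩
  rw [hss] at hperm
  have hpw := ss_pairwise (w :: t0)
  rw [hss, List.pairwise_cons] at hpw
  have h2all : ∀ p ∈ s0 :: rest, fst2 p ≤ fst2 s0 ∧ (fst2 p = fst2 s0 → snd2 p ≤ snd2 s0) := by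
    intro p hp
    rcases List.mem_cons.mp hp with rfl | hp
    · exact ⟨le_refl _, fun _ => le_refl _⟩
    · have := hpw.1 p hp; omega
  -- A's filter loop keeps exactly the rows no row strictly beats
  have hb0 : frontStep ((none : Option Int), fst2 s0, snd2 s0, []) s0 =
      ((none : Option Int), fst2 s0, snd2 s0, [s0]) := by
    simp only [frontStep, if_neg (lt_irrefl (fst2 s0))]; rfl
  have hfilt : (rest.foldl aStep (fst2 s0, snd2 s0, fst2 s0, snd2 s0, [s0])).2.2.2.2
      = ((s0 :: rest).foldl frontStep ((none : Option Int), fst2 s0, snd2 s0, [])).2.2.2 := by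
    rw [List.foldl_cons, hb0]
    exact filt rest (fst2 s0) (snd2 s0) (fst2 s0) (snd2 s0) (snd2 s0) none [s0]
      (hpw.2.imp (by intro a c h; omega))
      (fun q hq => by have := hpw.1 q hq; omega)
      rfl (fun _ => rfl) (by intro m hm; cases hm)
  have hkept : (rest.foldl aStep (fst2 s0, snd2 s0, fst2 s0, snd2 s0, [s0])).2.2.2.2
      = (s0 :: rest).filter (fun p => !domB (s0 :: rest) p) := by
    rw [hfilt]
    have := front_filter (s0 :: rest) (s0 :: rest) none (fst2 s0) (snd2 s0) []
      (List.pairwise_cons.mpr hpw) h2all (fun q hq => hq) (fun q hq => Or.inr hq)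
      (by
        intro y
        constructor
        · rintro ⟨q, hq, h1, h2⟩
          exact absurd h1 (by have := (h2all q hq).1; omega)
        · rintro ⟨m, hm, _⟩; cases hm)
      (by
        intro y
        constructor
        · rintro ⟨q, hq, h1, h2⟩
          have h3 := (h2all q hq).2 (by have := (h2all q hq).1; omega)
          show y < cmb none (snd2 s0)
          simp only [cmb]; omega
        · intro hy
          exact ⟨s0, List.mem_cons_self, le_refl _, by simpa [cmb] using hy⟩)
    simpa using this
  -- the same filter stated over the original list
  have hdcong : ∀ p : List Int, domB (s0 :: rest) p = domB (w :: t0) p :=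
    fun p => any_perm _ hperm
  have hkept2 : (rest.foldl aStep (fst2 s0, snd2 s0, fst2 s0, snd2 s0, [s0])).2.2.2.2
      = (s0 :: rest).filter (fun p => !domB (w :: t0) p) := by
    rw [hkept]
    exact List.filter_congr (fun p _ => by rw [hdcong p])
  -- A's second sort equals B's single fused sort
  have horder : PySem.List.sorted
      ((rest.foldl aStep (fst2 s0, snd2 s0, fst2 s0, snd2 s0, [s0])).2.2.2.2)
      (fun x => -(fst2 x + snd2 x)) =
      sort3 ((w :: t0).filter (fun p => !domB (w :: t0) p)) := by
    rw [hkept2, ← hss]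
    exact two_sorts (w :: t0) (fun p => !domB (w :: t0) p)
  have hordperm : (sort3 ((w :: t0).filter (fun p => !domB (w :: t0) p))).Perm
      ((w :: t0).filter (fun p => !domB (w :: t0) p)) := by
    simpa [sort3] using foldl_insertBy_perm lex3B ((w :: t0).filter (fun p => !domB (w :: t0) p)) []
  rcases Bool.eq_false_or_eq_true (domB (w :: t0) w) with hd | hd
  · -- w is beaten: A's rank loop never finds w, B returns -1 at the top
    have hA : solution (w :: t0) = -1 := by
      show (match PySem.List.sorted2 (w :: t0) (fun x => -(fst2 x)) (fun x => -(snd2 x)) with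
        | [] => (0 : Int)
        | s0 :: rest =>
          let st := rest.foldl aStep (fst2 s0, snd2 s0, fst2 s0, snd2 s0, [s0])
          let ins2 := PySem.List.sorted st.2.2.2.2 (fun x => -(fst2 x + snd2 x))
          match ins2 with
          | [] => (0 : Int)
          | j0 :: tl => rankLoop w (j0 :: tl) 0 (pySum j0) 1) = -1
      rw [hss]
      simp only
      cases hins : PySem.List.sorted
          ((rest.foldl aStep (fst2 s0, snd2 s0, fst2 s0, snd2 s0, [s0])).2.2.2.2)
          (fun x => -(fst2 x + snd2 x)) with
      | nil =>
        exfalso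
        have hs0m : s0 ∈ (s0 :: rest).filter (fun p => !domB (w :: t0) p) := by
          rw [List.mem_filter]
          refine ⟨List.mem_cons_self, ?_⟩
          have : domB (w :: t0) s0 = false := by
            rw [← hdcong s0]
            rcases Bool.eq_false_or_eq_true (domB (s0 :: rest) s0) with hd0 | hd0
            · obtain ⟨q, hq, h1, _⟩ := (domB_iff _ _).mp hd0
              exact absurd h1 (by have := (h2all q hq).1; omega)
            · exact hd0
          simp [this]
        rw [PySem.List.sorted_eq_nil_iff, hkept2] at hins
        rw [hins] at hs0m
        exact absurd hs0m List.not_mem_nil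
      | cons j0 tl =>
        have hwni : w ∉ j0 :: tl := by
          intro hmem
          rw [← hins, horder] at hmem
          have := (List.mem_filter.mp (hordperm.mem_iff.mp hmem)).2
          simp [hd] at this
        exact rankLoop_not_mem w (j0 :: tl) 0 (pySum j0) 1 hwni
    rw [hA]
    show (-1 : Int) = (if (w :: t0).any (fun q => decide (fst2 w < fst2 q) && decide (snd2 w < snd2 q)) then (-1 : Int)
      else _)
    rw [if_pos (by simpa [domB] using hd)]
  · -- w is kept: both sides compute 1 + first index of the minimal prefix sum
    have hwmem : w ∈ sort3 ((w :: t0).filter (fun p => !domB (w :: t0) p)) := by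
      rw [hordperm.mem_iff, List.mem_filter]
      exact ⟨List.mem_cons_self, by simp [hd]⟩
    have hinsne : PySem.List.sorted
        ((rest.foldl aStep (fst2 s0, snd2 s0, fst2 s0, snd2 s0, [s0])).2.2.2.2)
        (fun x => -(fst2 x + snd2 x)) ≠ [] := by
      rw [horder]
      intro h
      rw [h] at hwmem
      exact absurd hwmem List.not_mem_nil
    obtain ⟨j0, tl, hins2⟩ :
        ∃ j0 tl, PySem.List.sorted
          ((rest.foldl aStep (fst2 s0, snd2 s0, fst2 s0, snd2 s0, [s0])).2.2.2.2)
          (fun x => -(fst2 x + snd2 x)) = j0 :: tl := by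
      cases hc : PySem.List.sorted
          ((rest.foldl aStep (fst2 s0, snd2 s0, fst2 s0, snd2 s0, [s0])).2.2.2.2)
          (fun x => -(fst2 x + snd2 x)) with
      | nil => exact absurd hc hinsne
      | cons a b => exact ⟨a, b, rfl⟩
    -- A as the index?-match closed form
    have hA : solution (w :: t0) =
        (match PySem.List.index? (j0 :: tl) w with
         | none => (-1 : Int)
         | some j => bRank (((j0 :: tl).take (j + 1)).map pySum)) := by
      show (match PySem.List.sorted2 (w :: t0) (fun x => -(fst2 x)) (fun x => -(snd2 x)) with
        | [] => (0 : Int)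
        | s0 :: rest =>
          let st := rest.foldl aStep (fst2 s0, snd2 s0, fst2 s0, snd2 s0, [s0])
          let ins2 := PySem.List.sorted st.2.2.2.2 (fun x => -(fst2 x + snd2 x))
          match ins2 with
          | [] => (0 : Int)
          | j0 :: tl => rankLoop w (j0 :: tl) 0 (pySum j0) 1) = _
      rw [hss]
      simp only [hins2]
      rw [rankLoop.eq_def]
      simp only [lt_irrefl, if_false]
      by_cases hw : (j0 == w) = true
      · rw [if_pos hw]
        have hj0 : j0 = w := eq_of_beq hw
        subst hj0
        rw [PySem.List.index?_cons_self]
        simp [(bRank_single (pySum j0)).1]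
      · have hne2 : j0 ≠ w := fun h => hw (by simp [h])
        rw [if_neg hw]
        have hmin1 : minI [pySum j0] = pySum j0 := rfl
        have h2 : rankLoop w tl 1 (pySum j0) 1 =
            (match PySem.List.index? tl w with
             | none => -1
             | some j => bRank ((j0 :: tl.take (j + 1)).map pySum)) := by
          have h := rank_go w tl [j0] (by simp)
          have e1 : ((([j0] : List (List Int))).length : Int) = 1 := by simp
          have e2 : (([j0] : List (List Int)).map pySum) = [pySum j0] := rfl
          rw [e1, e2, hmin1, (bRank_single (pySum j0)).1] at h
          exact h
        show rankLoop w tl 1 (pySum j0) 1 = _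
        rw [h2, PySem.List.index?_cons_of_ne tl hne2]
        cases hidx : PySem.List.index? tl w with
        | none => rfl
        | some j =>
          simp only [Option.map_some]
          rw [List.take_succ_cons]
    rw [hA]
    -- B with its if-branch resolved and its order identified with A's ins2
    have hB : solution_alt (w :: t0) =
        (match PySem.List.index? (j0 :: tl) w with
         | none => (0 : Int)
         | some i0 => bRank (((j0 :: tl).take (i0 + 1)).map pySum)) := by
      show (if (w :: t0).any (fun q => decide (fst2 w < fst2 q) && decide (snd2 w < snd2 q)) then (-1 : Int)
        else
          match PySem.List.index? (sort3 ((w :: t0).filter (fun p =>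
            !((w :: t0).any (fun q => decide (fst2 p < fst2 q) && decide (snd2 p < snd2 q)))))) w with
          | none => (0 : Int)
          | some i0 => bRank (((sort3 ((w :: t0).filter (fun p =>
              !((w :: t0).any (fun q => decide (fst2 p < fst2 q) && decide (snd2 p < snd2 q)))))).take (i0 + 1)).map pySum)) = _
      rw [if_neg (by simp [show ((w :: t0).any fun q => decide (fst2 w < fst2 q) && decide (snd2 w < snd2 q)) = false from hd])]
      have : sort3 ((w :: t0).filter (fun p =>
          !((w :: t0).any (fun q => decide (fst2 p < fst2 q) && decide (snd2 p < snd2 q))))) = j0 :: tl := by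
        rw [← hins2, horder]; rfl
      rw [this]
    rw [hB]
    have hwm2 : w ∈ j0 :: tl := by rw [← hins2, horder]; exact hwmem
    obtain ⟨j, hj⟩ := index?_some_of_mem (j0 :: tl) w hwm2
    rw [hj]
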